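-- pv_equiv track=rewrite | github.com/IgorJustinoRodrigues/zsaude | backend/app/middleware/audit_writer.py | _resource_for
-- ===== SOURCE A (Python) =====
-- RESOURCE_BY_SEGMENT = {
--     "municipalities":  "Municipality",
--     "facilities":      "Facility",
--     "users":           "User",
--     "settings":        "Setting",
--     "work-context":    "WorkContext",
--     "audit":           "AuditLog",
-- }
--
-- def _resource_for(path: str) -> tuple[str, str]:
--     """Retorna (resource, resource_id). resource_id vazio se não inferido."""
--     parts = [p for p in path.split("/") if p and p != "api" and p != "v1"]
--     # Ex: ['admin', 'municipalities', '<uuid>', 'archive']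
--     # Ex: ['users', '<uuid>']
--     # Ex: ['system', 'settings', 'app_name']
--
--     resource = ""
--     resource_id = ""
--
--     # Varre da direita pra esquerda, encontra um par segmento-chave + id
--     idx = len(parts) - 1
--     while idx >= 0:
--         seg = parts[idx]
--         if seg in RESOURCE_BY_SEGMENT:
--             resource = RESOURCE_BY_SEGMENT[seg]
--             # próximo segmento à direita é o id candidato (se houver e não for verbo)
--             if idx + 1 < len(parts):
--                 nxt = parts[idx + 1]
--                 if not nxt.startswith("(") and nxt not in {"archive", "unarchive", "activate", "deactivate", "block", "reset-password", "select", "current", "options", "stats", "novo"}: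
--                     resource_id = nxt
--             break
--         idx -= 1
--     return resource, resource_id
-- ===== SOURCE B (Python) =====
-- RESOURCE_BY_SEGMENT = {
--     "municipalities":  "Municipality",
--     "facilities":      "Facility",
--     "users":           "User",
--     "settings":        "Setting",
--     "work-context":    "WorkContext",
--     "audit":           "AuditLog",
-- }
--
-- _VERBS = {"archive", "unarchive", "activate", "deactivate", "block", "reset-password", "select", "current", "options", "stats", "novo"}
--
-- def _resource_for(path: str) -> tuple[str, str]:
--     """Retorna (resource, resource_id). resource_id vazio se não inferido."""
--     parts = [p for p in path.split("/") if p and p != "api" and p != "v1"]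
--     resource = ""
--     resource_id = ""
--     # single left-to-right pass; the rightmost matching segment overwrites earlier ones
--     for i, seg in enumerate(parts):
--         r = RESOURCE_BY_SEGMENT.get(seg)
--         if r is not None:
--             resource = r
--             nxt = parts[i + 1] if i + 1 < len(parts) else ""
--             if nxt and not nxt.startswith("(") and nxt not in _VERBS:
--                 resource_id = nxt
--             else:
--                 resource_id = ""
--     return resource, resource_id
-- ===== Notes on version B (the rewrite author's own statement) =====
-- stated objective: alternative
-- what changed: Replaces A's right-to-left while loop that breaks on the first matching segment with a single left-to-right enumerate pass in which each matching segment overwrites (resource, resource_id), so the rightmost match wins without a break.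
import Mathlib
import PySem

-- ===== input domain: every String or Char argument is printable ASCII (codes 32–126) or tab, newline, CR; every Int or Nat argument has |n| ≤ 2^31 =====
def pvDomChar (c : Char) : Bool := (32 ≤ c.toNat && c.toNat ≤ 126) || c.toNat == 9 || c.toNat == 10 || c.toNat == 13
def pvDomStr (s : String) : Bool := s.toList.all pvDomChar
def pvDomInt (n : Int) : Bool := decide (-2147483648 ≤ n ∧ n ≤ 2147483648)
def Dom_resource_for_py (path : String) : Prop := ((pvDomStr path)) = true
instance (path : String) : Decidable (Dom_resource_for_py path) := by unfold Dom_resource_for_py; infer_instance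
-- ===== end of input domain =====

-- B replaces A's right-to-left break-on-first-match scan by one left-to-right
-- pass where the rightmost matching segment overwrites earlier results (objective: alternative).


-- ===== PORT A =====
def RESOURCE_BY_SEGMENT : PySem.Dict String String :=
  PySem.Dict.ofList [("municipalities", "Municipality"), ("facilities", "Facility"),
    ("users", "User"), ("settings", "Setting"), ("work-context", "WorkContext"),
    ("audit", "AuditLog")]

def pvVerbs : List String :=
  ["archive", "unarchive", "activate", "deactivate", "block", "reset-password",
   "select", "current", "options", "stats", "novo"]

def pvParts (path : String) : List String :=
  ((PySem.Str.split? path "/").getD []).filter (fun p => p ≠ "" && p ≠ "api" && p ≠ "v1")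

-- A's while loop: idx runs k-1, k-2, …, 0; break on the first (rightmost) match.
-- parts[idx] is always in range here, so the plain getD is exact.
def aLoop (parts : List String) : Nat → String × String
  | 0 => ("", "")
  | k + 1 =>
    let idx := k
    let seg := parts.getD idx ""
    match RESOURCE_BY_SEGMENT.get? seg with
    | some r =>
      let rid :=
        if idx + 1 < parts.length then
          let nxt := parts.getD (idx + 1) ""
          if ¬ PySem.Str.startswith nxt "(" ∧ nxt ∉ pvVerbs then nxt else ""
        else ""
      (r, rid)
    | none => aLoop parts k

def resource_for_py (path : String) : String × String :=
  let parts := pvParts path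
  aLoop parts parts.length

-- ===== PORT B =====
def bStep (parts : List String) (acc : String × String) (p : Int × String) : String × String :=
  match RESOURCE_BY_SEGMENT.get? p.2 with
  | some r =>
    let nxt := if p.1 + 1 < (parts.length : Int) then parts.getD (p.1 + 1).toNat "" else ""
    (r, if nxt ≠ "" ∧ ¬ PySem.Str.startswith nxt "(" ∧ nxt ∉ pvVerbs then nxt else "")
  | none => acc

def resource_for_py_alt (path : String) : String × String :=
  let parts := pvParts path
  (PySem.List.enumerate parts).foldl (bStep parts) ("", "")

-- ===== PRECONDITION & SPEC =====
def Spec_resource_for_py (path : String) (out : String × String) : Prop := out = resource_for_py_alt path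
instance (path : String) (out : String × String) : Decidable (Spec_resource_for_py path out) := by unfold Spec_resource_for_py; infer_instance

-- ===== CLAIM (what is proved, stated in full; the proofs are below) =====
def Claim_equal_resource_for_py : Prop := ∀ (path : String), Dom_resource_for_py path → Spec_resource_for_py path (resource_for_py path)

-- ===== LEMMAS AND PROOFS =====

theorem pvParts_ne_empty (path : String) : ∀ x ∈ pvParts path, x ≠ "" := by
  intro x hx
  simp only [pvParts, List.mem_filter, Bool.and_eq_true, decide_eq_true_eq] at hx
  exact hx.2.1.1

-- the fold over the first k enumerated entries equals A's descending loop
theorem loop_eq (parts : List String) (hne : ∀ x ∈ parts, x ≠ "") :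
    ∀ k, k ≤ parts.length →
      (PySem.List.enumerate (parts.take k)).foldl (bStep parts) ("", "") = aLoop parts k := by
  intro k
  induction k with
  | zero => intro _; simp [aLoop]
  | succ k ih =>
    intro hk
    have hklt : k < parts.length := Nat.lt_of_succ_le hk
    have htake : parts.take (k + 1) = parts.take k ++ [parts[k]] :=
      List.take_succ_eq_append_getElem hklt
    rw [htake, PySem.List.enumerate_append, List.foldl_append,
      ih (Nat.le_of_lt hklt)]
    have hlen : (parts.take k).length = k := List.length_take_of_le (Nat.le_of_lt hklt)
    simp only [hlen, PySem.List.enumerate, List.foldl_cons, List.foldl_nil]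
    show bStep parts (aLoop parts k) ((0 + (k : Int), parts[k])) = aLoop parts (k + 1)
    have hget : parts.getD k "" = parts[k] := List.getD_eq_getElem parts "" hklt
    cases hmatch : RESOURCE_BY_SEGMENT.get? parts[k] with
    | none =>
      rw [aLoop]
      simp only [bStep, hget, hmatch]
    | some r =>
      rw [aLoop]
      simp only [bStep, hget, hmatch]
      refine Prod.ext rfl ?_
      by_cases hlt : k + 1 < parts.length
      · have hlt' : (0 : Int) + (k : Int) + 1 < (parts.length : Int) := by omega
        have htn : ((0 : Int) + (k : Int) + 1).toNat = k + 1 := by omega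
        have hnxt : parts.getD (k + 1) "" = parts[k + 1] := List.getD_eq_getElem parts "" hlt
        have hnxt_ne : parts[k + 1] ≠ "" := hne _ (parts.getElem_mem hlt)
        simp only [if_pos hlt, if_pos hlt', htn, hnxt]
        by_cases hc : ¬ PySem.Str.startswith parts[k + 1] "(" = true ∧ parts[k + 1] ∉ pvVerbs
        · rw [if_pos ⟨hnxt_ne, hc⟩, if_pos hc]
        · rw [if_neg (fun h => hc h.2), if_neg hc]
      · have hlt' : ¬ ((0 : Int) + (k : Int) + 1 < (parts.length : Int)) := by omega
        rw [if_neg hlt, if_neg hlt']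
        simp

-- ===== VERDICT (by name: the statement is the Claim_ definition above) =====
theorem resource_for_py_spec : Claim_equal_resource_for_py := by
  intro path _
  unfold Spec_resource_for_py resource_for_py resource_for_py_alt
  rw [← loop_eq (pvParts path) (pvParts_ne_empty path) (pvParts path).length le_rfl,
    List.take_length]
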